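-- pv_equiv track=rewrite | github.com/lordyabu/EWISE | src/americanEconomicAssociation/web_scraper_aea.py | _reformat_volume_issue
-- ===== SOURCE A (Python) =====
-- def _reformat_volume_issue(volume_issue):
--     """
--     Reformats the volume and issue string to a more standard format.
--
--     Args:
--         volume_issue (str): The original volume and issue string, e.g., 'VOL. 61 NO. 4'
--
--     Returns:
--         str: Reformatted volume and issue string, e.g., 'Volume 61, Issue 4'
--     """
--
--     # Splitting the string on spaces and removing any empty strings
--     parts = [part for part in volume_issue.split() if part]
--
--     # Finding and formatting volume and issue numbers
--     volume = next((part for part in parts if part.isdigit()), None)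
--     issue = next((part for part in parts if part.isdigit() and part != volume), None)
--
--     # Formatting the string
--     if volume and issue:
--         return f"Volume {volume}, Issue {issue}"
--     elif volume:
--         return f"Volume {volume}, Issue 1"
--     else:
--         return volume_issue
-- ===== SOURCE B (Python) =====
-- def _reformat_volume_issue(volume_issue):
--     """Single pass over the whitespace-split tokens, tracking volume and issue."""
--     volume = None
--     issue = None
--     for part in volume_issue.split():
--         if part.isdigit():
--             if volume is None:
--                 volume = part
--             elif issue is None and part != volume:
--                 issue = part
--     if volume and issue:
--         return f"Volume {volume}, Issue {issue}"
--     elif volume: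
--         return f"Volume {volume}, Issue 1"
--     else:
--         return volume_issue
-- ===== Notes on version B (the rewrite author's own statement) =====
-- stated objective: alternative
-- what changed: A's two separate next(...) generator scans over the token list are replaced by a single loop over the split tokens maintaining volume/issue accumulators (and the redundant empty-token filter is dropped).
import Mathlib
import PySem

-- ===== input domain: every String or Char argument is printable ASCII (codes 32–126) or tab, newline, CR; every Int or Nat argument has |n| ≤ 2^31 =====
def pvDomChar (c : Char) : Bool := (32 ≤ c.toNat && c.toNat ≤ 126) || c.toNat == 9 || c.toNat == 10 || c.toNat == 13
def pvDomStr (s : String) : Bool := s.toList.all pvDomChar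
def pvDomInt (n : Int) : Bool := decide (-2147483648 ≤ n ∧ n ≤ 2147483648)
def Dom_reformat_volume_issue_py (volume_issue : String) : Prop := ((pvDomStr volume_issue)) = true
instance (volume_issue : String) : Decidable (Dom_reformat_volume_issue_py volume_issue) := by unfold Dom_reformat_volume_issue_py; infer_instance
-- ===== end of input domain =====

-- B replaces A's two separate next(...) scans over the token list by one accumulator loop; alternative decomposition, same cost.

-- ===== PORT A =====
-- Python truthiness 'if volume and issue': a found token satisfies isdigit and is hence
-- nonempty and truthy, so truthiness of volume/issue is exactly Option.isSome here.
def reformat_volume_issue_py (volume_issue : String) : String :=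
  let parts := (PySem.Str.split₀ volume_issue).filter (fun p => decide (p ≠ ""))
  let volume := parts.find? (fun p => PySem.Str.strIsdigit p)
  let issue := parts.find? (fun p => PySem.Str.strIsdigit p && decide (some p ≠ volume))
  match volume, issue with
  | some v, some i => "Volume " ++ v ++ ", Issue " ++ i
  | some v, none => "Volume " ++ v ++ ", Issue 1"
  | none, _ => volume_issue

-- ===== PORT B =====
-- one fold over the split tokens, state = (volume?, issue?)
def pvStepB (st : Option String × Option String) (part : String) : Option String × Option String :=
  if PySem.Str.strIsdigit part then
    match st with
    | (none, iss) => (some part, iss)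
    | (some v, none) => if part ≠ v then (some v, some part) else (some v, none)
    | st => st
  else st

def reformat_volume_issue_py_alt (volume_issue : String) : String :=
  match (PySem.Str.split₀ volume_issue).foldl pvStepB (none, none) with
  | (some v, some i) => "Volume " ++ v ++ ", Issue " ++ i
  | (some v, none) => "Volume " ++ v ++ ", Issue 1"
  | (none, _) => volume_issue

-- ===== PRECONDITION & SPEC =====
def Spec_reformat_volume_issue_py (volume_issue : String) (out : String) : Prop := out = reformat_volume_issue_py_alt volume_issue
instance (volume_issue : String) (out : String) : Decidable (Spec_reformat_volume_issue_py volume_issue out) := by unfold Spec_reformat_volume_issue_py; infer_instance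

-- ===== CLAIM (what is proved, stated in full; the proofs are below) =====
def Claim_equal_reformat_volume_issue_py : Prop := ∀ (volume_issue : String), Dom_reformat_volume_issue_py volume_issue → Spec_reformat_volume_issue_py volume_issue (reformat_volume_issue_py volume_issue)

-- ===== LEMMAS AND PROOFS =====

-- a full state is absorbing for the fold step
lemma pvFold_full (xs : List String) (v i : String) :
    xs.foldl pvStepB (some v, some i) = (some v, some i) := by
  induction xs with
  | nil => rfl
  | cons p rest ih =>
      simp only [List.foldl_cons, pvStepB]
      split_ifs <;> exact ih

-- once volume = v is found, the fold finds the first later digit token ≠ v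
lemma pvFold_some (xs : List String) (v : String) :
    xs.foldl pvStepB (some v, none)
      = (some v, xs.find? (fun p => PySem.Str.strIsdigit p && decide (p ≠ v))) := by
  induction xs with
  | nil => rfl
  | cons p rest ih =>
      simp only [List.foldl_cons, pvStepB, List.find?]
      by_cases hd : PySem.Chars.strIsdigit p.toList = true
      · by_cases hne : p = v
        · simp [hne, ih]
        · simp [hd, hne, pvFold_full]
      · simp [hd, ih]

-- the fold from the empty state computes A's two find? scans
lemma pvFold_none (xs : List String) :
    xs.foldl pvStepB (none, none)
      = (xs.find? (fun p => PySem.Str.strIsdigit p),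
         xs.find? (fun p => PySem.Str.strIsdigit p
                    && decide (some p ≠ xs.find? (fun q => PySem.Str.strIsdigit q)))) := by
  induction xs with
  | nil => rfl
  | cons p rest ih =>
      simp only [List.foldl_cons, pvStepB, List.find?]
      by_cases hd : PySem.Chars.strIsdigit p.toList = true
      · simp only [hd, if_pos, PySem.Str.strIsdigit_eq, Bool.true_and]
        rw [pvFold_some]
        have h1 : (decide (some p ≠ some p)) = false := by simp
        simp only [h1]
        congr 2
        funext q
        simp
      · simp only [PySem.Str.strIsdigit_eq, hd, Bool.false_and, if_neg, Bool.false_eq_true,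
          not_false_eq_true, ih]
        rfl

-- empty tokens satisfy neither scan's predicate, so A's filter is invisible to find?
lemma pvFind_filter (xs : List String) (pred : String → Bool)
    (h : pred "" = false) :
    (xs.filter (fun p => decide (p ≠ ""))).find? pred = xs.find? pred := by
  rw [List.find?_filter]
  congr 1
  funext a
  by_cases ha : a = "" <;> simp [ha, h]

-- ===== VERDICT (by name: the statement is the Claim_ definition above) =====
theorem reformat_volume_issue_py_spec : Claim_equal_reformat_volume_issue_py := by
  intro s _
  unfold Spec_reformat_volume_issue_py reformat_volume_issue_py reformat_volume_issue_py_alt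
  rw [pvFold_none]
  simp only []
  rw [pvFind_filter _ _ (by simp [PySem.Chars.strIsdigit])]
  rw [pvFind_filter _ _ (by simp [PySem.Chars.strIsdigit])]
  generalize List.find? (fun p => PySem.Str.strIsdigit p) (PySem.Str.split₀ s) = vol
  generalize List.find? (fun p => PySem.Str.strIsdigit p && decide (some p ≠ vol)) (PySem.Str.split₀ s) = iss
  cases vol <;> cases iss <;> rfl
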